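-- pv_equiv track=rewrite | github.com/danth/pathfinder.vim | pathfinder/search.py | search
-- ===== SOURCE A (Python) =====
-- def search(text, start, target):
--     search_text = text[target:]
--
--     text = text[start + 1 :] + text[:start]
--     target -= start + 1
--     if target < 0:
--         target = len(text) + target + 1
--
--     for query_length in range(1, len(search_text) + 1):
--         query = search_text[:query_length]
--         if text.index(query) == target:
--             return query
-- ===== SOURCE B (Python) =====
-- def search(text, start, target):
--     search_text = text[target:]
--
--     rot = text[start + 1 :] + text[:start]
--     pos = target - (start + 1)
--     if pos < 0:
--         pos = len(rot) + pos + 1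
--
--     # The first occurrence index of search_text[:L] in rot is nondecreasing in L
--     # (treating "not found" as +infinity), so binary-search the smallest L whose
--     # first occurrence is >= pos, then check that single candidate.
--     n = len(search_text)
--     lo, hi = 1, n + 1
--     while lo < hi:
--         mid = (lo + hi) // 2
--         r = rot.find(search_text[:mid])
--         if r != -1 and r < pos:
--             lo = mid + 1
--         else:
--             hi = mid
--     if lo <= n and rot.find(search_text[:lo]) == pos:
--         return search_text[:lo]
--     return None
-- ===== Notes on version B (the rewrite author's own statement) =====
-- stated objective: faster
-- what changed: Replaces A's linear scan over all prefix lengths (one substring search per length) by a binary search on the prefix length, exploiting that the first-occurrence index of search_text[:L] is nondecreasing in L, so only O(log n) substring searches are made.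
import Mathlib
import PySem

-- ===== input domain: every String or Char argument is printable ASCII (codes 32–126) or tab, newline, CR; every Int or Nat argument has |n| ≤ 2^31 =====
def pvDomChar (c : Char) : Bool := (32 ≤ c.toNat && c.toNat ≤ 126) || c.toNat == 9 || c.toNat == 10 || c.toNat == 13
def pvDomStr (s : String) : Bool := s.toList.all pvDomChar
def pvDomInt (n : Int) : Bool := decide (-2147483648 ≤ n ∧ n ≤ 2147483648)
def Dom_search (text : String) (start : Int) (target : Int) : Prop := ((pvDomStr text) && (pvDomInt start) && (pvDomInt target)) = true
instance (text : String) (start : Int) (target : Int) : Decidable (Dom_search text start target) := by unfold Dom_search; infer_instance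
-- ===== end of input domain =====

-- B replaces A's linear scan over prefix lengths (one substring search per length) by a
-- binary search on the prefix length, using that the first-occurrence index is monotone
-- in the length; equivalence of the RETURN value is proved on Pre_ (where A raises no ValueError).

-- ===== PORT A =====
-- A's for-loop over query_length = 1 .. len(search_text); text.index raising ValueError is
-- modelled by returning none at the `find = -1` branch, a path Pre_search excludes.
def searchGo (st rot : List Char) (pos : Int) (L : Nat) : Option (List Char) :=
  if L ≤ st.length then
    if PySem.Chars.find rot (st.take L) = -1 then none   -- Python: ValueError (excluded by Pre_search)
    else if PySem.Chars.find rot (st.take L) = pos then some (st.take L)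
    else searchGo st rot pos (L + 1)
  else none
termination_by st.length + 1 - L

def search (text : String) (start : Int) (target : Int) : Option String :=
  let s := text.toList
  let searchText := PySem.Chars.slice s (some target) none
  let rot := PySem.Chars.slice s (some (start + 1)) none ++ PySem.Chars.slice s none (some start)
  let pos0 := target - (start + 1)
  let pos := if pos0 < 0 then (rot.length : Int) + pos0 + 1 else pos0
  (searchGo searchText rot pos 1).map String.ofList

-- ===== PORT B =====
-- B's while-loop: binary search for the least L in [1, n+1) whose first occurrence is not < pos.
-- fuel makes the while-loop structurally recursive; n + 1 steps always suffice (hi - lo shrinks)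
def bsGo (st rot : List Char) (pos : Int) : Nat → Nat → Nat → Nat
  | 0, lo, _ => lo
  | fuel + 1, lo, hi =>
    if lo < hi then
      if PySem.Chars.find rot (st.take ((lo + hi) / 2)) ≠ -1 ∧
          PySem.Chars.find rot (st.take ((lo + hi) / 2)) < pos then
        bsGo st rot pos fuel ((lo + hi) / 2 + 1) hi
      else bsGo st rot pos fuel lo ((lo + hi) / 2)
    else lo

def search_alt (text : String) (start : Int) (target : Int) : Option String :=
  let s := text.toList
  let searchText := PySem.Chars.slice s (some target) none
  let rot := PySem.Chars.slice s (some (start + 1)) none ++ PySem.Chars.slice s none (some start)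
  let pos0 := target - (start + 1)
  let pos := if pos0 < 0 then (rot.length : Int) + pos0 + 1 else pos0
  let n := searchText.length
  let L0 := bsGo searchText rot pos (n + 1) 1 (n + 1)
  if L0 ≤ n ∧ PySem.Chars.find rot (searchText.take L0) = pos then
    some (String.ofList (searchText.take L0))
  else none

-- ===== PRECONDITION & SPEC =====
-- Pre_search excludes exactly the inputs on which A raises ValueError (some tested prefix of
-- text[target:] does not occur in the rotated text before A returns); it holds iff A returns.
def Pre_search (text : String) (start : Int) (target : Int) : Prop :=
  let s := text.toList
  let searchText := PySem.Chars.slice s (some target) none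
  let rot := PySem.Chars.slice s (some (start + 1)) none ++ PySem.Chars.slice s none (some start)
  let pos0 := target - (start + 1)
  let pos := if pos0 < 0 then (rot.length : Int) + pos0 + 1 else pos0
  PySem.Chars.isIn searchText rot = true ∨
    (0 ≤ pos ∧ ∃ L ∈ List.range searchText.length, PySem.Chars.find rot (searchText.take (L + 1)) = pos)
instance (text : String) (start : Int) (target : Int) : Decidable (Pre_search text start target) := by
  unfold Pre_search; infer_instance

def pvWitness_search : String × Int × Int := ("ab", 0, 1)

def Spec_search (text : String) (start : Int) (target : Int) (out : Option String) : Prop := out = search_alt text start target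
instance (text : String) (start : Int) (target : Int) (out : Option String) : Decidable (Spec_search text start target out) := by unfold Spec_search; infer_instance

-- ===== CLAIM (what is proved, stated in full; the proofs are below) =====
def Claim_equal_search : Prop := ∀ (text : String) (start : Int) (target : Int), Dom_search text start target → Pre_search text start target → Spec_search text start target (search text start target)

-- ===== LEMMAS AND PROOFS =====

-- take L is a prefix of take L' for L ≤ L'
lemma pvTake_prefix_take {α : Type} (xs : List α) {L L' : Nat} (h : L ≤ L') :
    xs.take L <+: xs.take L' := by
  have : xs.take L = (xs.take L').take L := by
    rw [List.take_take, Nat.min_eq_left h]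
  rw [this]; exact List.take_prefix _ _

-- if st occurs in rot, every prefix of st is found
lemma pvPrefix_found (st rot : List Char) (L : Nat) (hin : PySem.Chars.isIn st rot = true) :
    PySem.Chars.find rot (st.take L) ≠ -1 := by
  rw [PySem.Chars.find_ne_neg_one_iff]
  exact (List.take_prefix _ _).isInfix.trans ((PySem.Chars.isIn_iff_infix _ _).mp hin)

-- monotonicity of the first-occurrence index in the prefix length
lemma pvFind_mono (st rot : List Char) {L L' : Nat} (h : L ≤ L')
    (h' : PySem.Chars.find rot (st.take L') ≠ -1) :
    PySem.Chars.find rot (st.take L) ≠ -1 ∧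
      PySem.Chars.find rot (st.take L) ≤ PySem.Chars.find rot (st.take L') := by
  have h0' : 0 ≤ PySem.Chars.find rot (st.take L') := by
    have := PySem.Chars.neg_one_le_find rot (st.take L'); omega
  obtain ⟨hp, _⟩ := PySem.Chars.find_spec h0'
  have hpre : st.take L <+: rot.drop (PySem.Chars.find rot (st.take L')).toNat :=
    (pvTake_prefix_take st h).trans hp
  have hfound : 0 ≤ PySem.Chars.find rot (st.take L) := by
    rw [PySem.Chars.find_nonneg_iff]
    exact ((PySem.Chars.isIn_iff_infix _ _).mp
      ((PySem.Chars.exists_prefix_drop_iff_isIn _ _).mp ⟨_, hpre⟩))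
  obtain ⟨_, hmin⟩ := PySem.Chars.find_spec hfound
  constructor
  · omega
  · by_contra hcon
    push Not at hcon
    have : (PySem.Chars.find rot (st.take L')).toNat < (PySem.Chars.find rot (st.take L)).toNat := by
      omega
    exact hmin _ this hpre

-- binary-search invariants
lemma pvBsGo_spec (st rot : List Char) (pos : Int) :
    ∀ (d lo hi : Nat), hi - lo ≤ d → lo ≤ hi →
      lo ≤ bsGo st rot pos d lo hi ∧ bsGo st rot pos d lo hi ≤ hi ∧
      (∀ L, lo ≤ L → L < bsGo st rot pos d lo hi →
        PySem.Chars.find rot (st.take L) ≠ -1 ∧ PySem.Chars.find rot (st.take L) < pos) ∧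
      (bsGo st rot pos d lo hi < hi →
        ¬(PySem.Chars.find rot (st.take (bsGo st rot pos d lo hi)) ≠ -1 ∧
          PySem.Chars.find rot (st.take (bsGo st rot pos d lo hi)) < pos)) := by
  intro d
  induction d with
  | zero =>
    intro lo hi hd hlh
    have heq : lo = hi := by omega
    subst heq
    simp only [bsGo]
    exact ⟨le_refl _, le_refl _, fun L h1 h2 => absurd h2 (by omega), fun h => absurd h (by omega)⟩
  | succ d ih =>
    intro lo hi hd hlh
    by_cases hlt : lo < hi
    · rw [bsGo, if_pos hlt]
      have hmlo : lo ≤ (lo + hi) / 2 := by omega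
      have hmhi : (lo + hi) / 2 < hi := by omega
      by_cases hc : PySem.Chars.find rot (st.take ((lo + hi) / 2)) ≠ -1 ∧
          PySem.Chars.find rot (st.take ((lo + hi) / 2)) < pos
      · rw [if_pos hc]
        obtain ⟨r1, r2, r3, r4⟩ := ih ((lo + hi) / 2 + 1) hi (by omega) (by omega)
        refine ⟨by omega, r2, ?_, r4⟩
        intro L hL1 hLr
        by_cases hLm : L ≤ (lo + hi) / 2
        · obtain ⟨f1, f2⟩ := pvFind_mono st rot hLm hc.1
          exact ⟨f1, by have := hc.2; omega⟩
        · exact r3 L (by omega) hLr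
      · rw [if_neg hc]
        obtain ⟨r1, r2, r3, r4⟩ := ih lo ((lo + hi) / 2) (by omega) (by omega)
        refine ⟨r1, by omega, r3, ?_⟩
        intro _
        by_cases hrm : bsGo st rot pos d lo ((lo + hi) / 2) < (lo + hi) / 2
        · exact r4 hrm
        · have : bsGo st rot pos d lo ((lo + hi) / 2) = (lo + hi) / 2 := by omega
          rw [this]; exact hc
    · rw [bsGo, if_neg hlt]
      exact ⟨le_refl _, by omega, fun L h1 h2 => absurd h2 (by omega),
        fun h => absurd h (by omega)⟩

-- A's loop returns some (st.take L0) once it reaches a length whose first occurrence is pos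
lemma pvSearchGo_stop (st rot : List Char) (pos : Int) (L0 : Nat)
    (hn : L0 ≤ st.length)
    (hlt : ∀ L, 1 ≤ L → L < L0 →
      PySem.Chars.find rot (st.take L) ≠ -1 ∧ PySem.Chars.find rot (st.take L) < pos)
    (hne : PySem.Chars.find rot (st.take L0) ≠ -1)
    (heq : PySem.Chars.find rot (st.take L0) = pos) :
    ∀ L, 1 ≤ L → L ≤ L0 → searchGo st rot pos L = some (st.take L0) := by
  intro L
  induction hd : L0 - L using Nat.strong_induction_on generalizing L with
  | _ d ih =>
    intro hL1 hLle
    rw [searchGo, if_pos (le_trans hLle hn)]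
    by_cases hL0 : L = L0
    · subst hL0
      rw [if_neg hne, if_pos heq]
    · have hLlt : L < L0 := by omega
      obtain ⟨f1, f2⟩ := hlt L hL1 hLlt
      rw [if_neg f1, if_neg (by omega : ¬ PySem.Chars.find rot (st.take L) = pos)]
      exact ih (L0 - (L + 1)) (by omega) (L + 1) rfl (by omega) (by omega)

-- A's loop returns none when every prefix is found but none has first occurrence pos
lemma pvSearchGo_none (st rot : List Char) (pos : Int)
    (h : ∀ L, 1 ≤ L → L ≤ st.length →
      PySem.Chars.find rot (st.take L) ≠ -1 ∧ PySem.Chars.find rot (st.take L) ≠ pos) :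
    ∀ L, 1 ≤ L → searchGo st rot pos L = none := by
  intro L
  induction hd : st.length + 1 - L using Nat.strong_induction_on generalizing L with
  | _ d ih =>
    intro hL1
    rw [searchGo]
    by_cases hLn : L ≤ st.length
    · rw [if_pos hLn]
      obtain ⟨f1, f2⟩ := h L hL1 hLn
      rw [if_neg f1, if_neg f2]
      exact ih (st.length + 1 - (L + 1)) (by omega) (L + 1) rfl (by omega)
    · rw [if_neg hLn]

-- the core equivalence, on the already-rotated data
lemma pvCore (st rot : List Char) (pos : Int)
    (hpre : PySem.Chars.isIn st rot = true ∨
      (0 ≤ pos ∧ ∃ L ∈ List.range st.length, PySem.Chars.find rot (st.take (L + 1)) = pos)) :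
    searchGo st rot pos 1 =
      (if bsGo st rot pos (st.length + 1) 1 (st.length + 1) ≤ st.length ∧
          PySem.Chars.find rot (st.take (bsGo st rot pos (st.length + 1) 1 (st.length + 1))) = pos then
        some (st.take (bsGo st rot pos (st.length + 1) 1 (st.length + 1)))
      else none) := by
  obtain ⟨s1, s2, s3, s4⟩ :=
    pvBsGo_spec st rot pos (st.length + 1) 1 (st.length + 1) (by omega) (by omega)
  set L0 := bsGo st rot pos (st.length + 1) 1 (st.length + 1) with hL0
  by_cases hcase : L0 ≤ st.length ∧ PySem.Chars.find rot (st.take L0) = pos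
  · simp only [hcase]
    have hne : PySem.Chars.find rot (st.take L0) ≠ -1 := by
      rcases hpre with hin | ⟨hpos, _⟩
      · exact pvPrefix_found st rot L0 hin
      · rw [hcase.2]; omega
    exact pvSearchGo_stop st rot pos L0 hcase.1 (fun L h1 h2 => s3 L h1 h2) hne hcase.2 1
      (by omega) (by omega)
  · simp only [hcase, if_false]
    -- no tested length has first occurrence pos
    have hnopos : ∀ L, 1 ≤ L → L ≤ st.length → PySem.Chars.find rot (st.take L) ≠ pos := by
      intro L hL1 hLn heq
      by_cases hLlt : L < L0
      · have := (s3 L hL1 hLlt).2; omega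
      · have hL0n : L0 ≤ st.length := by omega
        have hpred := s4 (by omega)
        by_cases hpos : 0 ≤ pos
        · have hfne : PySem.Chars.find rot (st.take L) ≠ -1 := by rw [heq]; omega
          obtain ⟨g1, g2⟩ := pvFind_mono st rot (show L0 ≤ L by omega) hfne
          have : PySem.Chars.find rot (st.take L0) = pos := by
            rw [heq] at g2
            rcases not_and_or.mp hpred with hx | hx
            · exact absurd g1 (by simpa using hx)
            · omega
          exact hcase ⟨hL0n, this⟩
        · -- pos < 0: then find = pos forces find = -1 = pos, impossible under Pre
          have hm1 := PySem.Chars.neg_one_le_find rot (st.take L)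
          have hfm1 : PySem.Chars.find rot (st.take L) = -1 := by omega
          rcases hpre with hin | ⟨hp, _⟩
          · exact pvPrefix_found st rot L hin hfm1
          · omega
    have hfound : PySem.Chars.isIn st rot = true := by
      rcases hpre with hin | ⟨hpos, L', hL', heq⟩
      · exact hin
      · exfalso
        have hL'n : L' < st.length := List.mem_range.mp hL'
        exact hnopos (L' + 1) (by omega) (by omega) heq
    exact pvSearchGo_none st rot pos
      (fun L h1 h2 => ⟨pvPrefix_found st rot L hfound, hnopos L h1 h2⟩) 1 (by omega)

-- the core equivalence, with the final List Char → String conversion applied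
lemma pvCoreMap (st rot : List Char) (pos : Int)
    (hpre : PySem.Chars.isIn st rot = true ∨
      (0 ≤ pos ∧ ∃ L ∈ List.range st.length, PySem.Chars.find rot (st.take (L + 1)) = pos)) :
    (searchGo st rot pos 1).map String.ofList =
      (if bsGo st rot pos (st.length + 1) 1 (st.length + 1) ≤ st.length ∧
          PySem.Chars.find rot (st.take (bsGo st rot pos (st.length + 1) 1 (st.length + 1))) = pos then
        some (String.ofList (st.take (bsGo st rot pos (st.length + 1) 1 (st.length + 1))))
      else none) := by
  by_cases hc : bsGo st rot pos (st.length + 1) 1 (st.length + 1) ≤ st.length ∧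
      PySem.Chars.find rot (st.take (bsGo st rot pos (st.length + 1) 1 (st.length + 1))) = pos
  · rw [pvCore st rot pos hpre, if_pos hc, if_pos hc, Option.map_some]
  · rw [pvCore st rot pos hpre, if_neg hc, if_neg hc, Option.map_none]

-- ===== VERDICT (by name: the statement is the Claim_ definition above) =====
theorem search_spec : Claim_equal_search := by
  intro text start target _ hpre
  unfold Spec_search search search_alt
  unfold Pre_search at hpre
  exact pvCoreMap _ _ _ hpre
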